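-- pv_equiv track=rewrite | github.com/kamwar/simLAB | util/coder.py | decodeGsm7
-- ===== SOURCE A (Python) =====
-- GSM7_BASIC = (u"@£$¥èéùìòÇ\nØø\rÅåΔ_ΦΓΛΩΠΨΣΘΞ\x1bÆæßÉ !\"#¤%&'()*+,-./0123456789:;<=>"
--               u"?¡ABCDEFGHIJKLMNOPQRSTUVWXYZÄÖÑÜ`¿abcdefghijklmnopqrstuvwxyzäöñüà")
--
-- GSM7_EXT = (u"````````````````````^```````````````````{}`````\\````````````[~]`"
--             u"|````````````````````````````````````€``````````````````````````")
--
-- def decodeGsm7(codedtext):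
--     if not codedtext:
--         raise Exception("Empy data to decode")
--     hexparts = chunks(codedtext, 2)
--     number   = 0
--     bitcount = 0
--     output   = ''
--     found_external = False
--     for byte in hexparts:
--         byte = int(byte, 16);
--         # add data on to the end
--         number = number + (byte << bitcount)
--         # increase the counter
--         bitcount = bitcount + 1
--         # output the first 7 bits
--         if number % 128 == 27:
--              '''skip'''
--              found_external = True
--         else:
--             if found_external == True:
--                  character = GSM7_EXT[number % 128]
--                  found_external = False
--             else:
--                  character = GSM7_BASIC[number % 128]
--             output = output + character
--
--         # then throw them away
--         number = number >> 7
--         # every 7th letter you have an extra one in the buffer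
--         if bitcount == 7:
--             if number % 128 == 27:
--                 '''skip'''
--                 found_external = True
--             else:
--                 if found_external == True:
--                     character = GSM7_EXT[number % 128]
--                     found_external = False
--                 else:
--                     character = GSM7_BASIC[number % 128]
--                 output = output + character
--
--             bitcount = 0
--             number = 0
--     return output
--
-- def chunks(l, n):
--     if n < 1:
--         n = 1
--     return [l[i:i + n] for i in range(0, len(l), n)]
-- ===== SOURCE B (Python) =====
-- GSM7_BASIC = (u"@\u00a3$\u00a5\u00e8\u00e9\u00f9\u00ec\u00f2\u00c7\n\u00d8\u00f8\r\u00c5\u00e5\u0394_\u03a6\u0393\u039b\u03a9\u03a0\u03a8\u03a3\u0398\u039e\x1b\u00c6\u00e6\u00df\u00c9 !\"#\u00a4%&'()*+,-./0123456789:;<=>"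
--               u"?\u00a1ABCDEFGHIJKLMNOPQRSTUVWXYZ\u00c4\u00d6\u00d1\u00dc`\u00bfabcdefghijklmnopqrstuvwxyz\u00e4\u00f6\u00f1\u00fc\u00e0")
--
-- GSM7_EXT = (u"````````````````````^```````````````````{}`````\\````````````[~]`"
--             u"|````````````````````````````````````\u20ac``````````````````````````")
--
-- def decodeGsm7(codedtext):
--     # Two-pass decoding: pass 1 packs each 7-byte group into one integer and
--     # extracts its septets; pass 2 maps septets to characters with an escape flag.
--     if not codedtext:
--         raise Exception("Empy data to decode")
--     data = [int(codedtext[i:i + 2], 16) for i in range(0, len(codedtext), 2)]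
--     septets = []
--     g = 0
--     while g < len(data):
--         group = data[g:g + 7]
--         acc = 0
--         for j, byte in enumerate(group):
--             acc += byte << (8 * j)
--         count = len(group) + (1 if len(group) == 7 else 0)
--         for k in range(count):
--             septets.append((acc >> (7 * k)) & 127)
--         g += 7
--     out = []
--     esc = False
--     for s in septets:
--         if s == 27:
--             esc = True
--         elif esc:
--             out.append(GSM7_EXT[s])
--             esc = False
--         else:
--             out.append(GSM7_BASIC[s])
--     return ''.join(out)
-- ===== Notes on version B (the rewrite author's own statement) =====
-- stated objective: alternative
-- what changed: Replaces A's single streaming loop that interleaves bit accumulation, septet extraction and character emission with two passes: pass 1 packs each 7-byte group into one integer and extracts all its septets arithmetically ((acc >> 7k) & 127), pass 2 decodes the septet list with an escape flag, joining the characters at the end.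
import Mathlib
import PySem

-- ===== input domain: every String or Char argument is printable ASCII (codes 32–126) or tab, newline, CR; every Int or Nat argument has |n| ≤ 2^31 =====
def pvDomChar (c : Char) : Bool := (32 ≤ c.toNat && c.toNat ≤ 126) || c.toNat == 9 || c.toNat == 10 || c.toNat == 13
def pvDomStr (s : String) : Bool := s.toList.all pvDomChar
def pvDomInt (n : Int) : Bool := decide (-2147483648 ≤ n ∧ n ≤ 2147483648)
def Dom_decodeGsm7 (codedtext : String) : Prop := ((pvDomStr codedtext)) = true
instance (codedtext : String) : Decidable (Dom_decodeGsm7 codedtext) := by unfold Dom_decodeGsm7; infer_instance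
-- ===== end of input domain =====

-- B re-decomposes A's single streaming loop into two passes (groupwise septet
-- extraction, then decoding); return values are proved equal wherever A returns.

-- ===== PORT A =====

-- the two 128-character GSM7 tables, as character lists
def gsm7Basic : List Char :=
  "@£$¥èéùìòÇ\nØø\rÅåΔ_ΦΓΛΩΠΨΣΘΞ\x1bÆæßÉ !\"#¤%&'()*+,-./0123456789:;<=>?¡ABCDEFGHIJKLMNOPQRSTUVWXYZÄÖÑÜ`¿abcdefghijklmnopqrstuvwxyzäöñüà".toList

def gsm7Ext : List Char :=
  "````````````````````^```````````````````{}`````\\````````````[~]`|````````````````````````````````````€``````````````````````````".toList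

-- value of a single hexadecimal digit
def hexVal? (c : Char) : Option Nat :=
  if '0' ≤ c ∧ c ≤ '9' then some (c.toNat - '0'.toNat)
  else if 'a' ≤ c ∧ c ≤ 'f' then some (c.toNat - 'a'.toNat + 10)
  else if 'A' ≤ c ∧ c ≤ 'F' then some (c.toNat - 'A'.toNat + 10)
  else none

-- whitespace characters of the domain (Python's int() also strips \x0b/\x0c,
-- which are outside Dom_decodeGsm7)
def isPySpace (c : Char) : Bool := c = ' ' || c = '\t' || c = '\n' || c = '\r'

-- int(s, 16) for strings of length ≤ 2: optional sign or stripped whitespace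
-- around a digit, or two digits; exact for such strings over Dom characters
-- (none = ValueError).  Used by both ports (both Pythons call int(·, 16)).
def pyIntHex2? (cs : List Char) : Option Int :=
  match cs with
  | [c] => (hexVal? c).map (fun v => (v : Int))
  | [c1, c2] =>
    match hexVal? c1, hexVal? c2 with
    | some v1, some v2 => some (16 * (v1 : Int) + (v2 : Int))
    | some v1, none => if isPySpace c2 then some ((v1 : Int)) else none
    | none, some v2 =>
      if c1 = '+' then some ((v2 : Int))
      else if c1 = '-' then some (-(v2 : Int))
      else if isPySpace c1 then some ((v2 : Int)) else none
    | none, none => none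
  | _ => none

-- helper 'chunks(l, n)' of A
def chunksA (l : List Char) (n : Int) : List (List Char) :=
  let n := if n < 1 then 1 else n
  (PySem.List.pyRange 0 l.length n).map (fun i => PySem.List.slice l (some i) (some (i + n)))

-- loop body of A; state = (number, bitcount, output, found_external)
def stepA (st : Int × Int × List Char × Bool) (chunk : List Char) : Int × Int × List Char × Bool :=
  let (number, bitcount, output, found) := st
  let byte : Int := (pyIntHex2? chunk).getD 0   -- int(byte, 16); none excluded by Pre_
  let number := number + byte * 2 ^ bitcount.toNat   -- byte << bitcount (bitcount ≥ 0 throughout)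
  let bitcount := bitcount + 1
  let (output, found) :=
    if PySem.Int.mod number 128 == 27 then (output, true)
    else if found then (output ++ [PySem.List.pyGetD gsm7Ext (PySem.Int.mod number 128) '`'], false)
    else (output ++ [PySem.List.pyGetD gsm7Basic (PySem.Int.mod number 128) '`'], false)
  let number := PySem.Int.floordiv number 128   -- number >> 7
  if bitcount == 7 then
    let (output, found) :=
      if PySem.Int.mod number 128 == 27 then (output, true)
      else if found then (output ++ [PySem.List.pyGetD gsm7Ext (PySem.Int.mod number 128) '`'], false)
      else (output ++ [PySem.List.pyGetD gsm7Basic (PySem.Int.mod number 128) '`'], false)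
    (0, 0, output, found)
  else (number, bitcount, output, found)

def decodeGsm7 (codedtext : String) : String :=
  let cs := codedtext.toList
  if cs = [] then ""   -- Python raises Exception("Empy data to decode"); excluded by Pre_
  else
    let hexparts := chunksA cs 2
    let st := hexparts.foldl stepA ((0 : Int), (0 : Int), ([] : List Char), false)
    String.ofList st.2.2.1   -- Python builds 'output' by string concatenation; ported on List Char

-- ===== PORT B =====

-- acc accumulated over 'for j, byte in enumerate(group)'
def accOfB (group : List Int) : Int :=
  (PySem.List.enumerate group 0).foldl (fun acc jb => acc + jb.2 * 2 ^ (8 * jb.1.toNat)) 0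

-- septets contributed by one group: (acc >> (7*k)) & 127 for k < count
-- ('& 127' on a Python int is floor-mod 2^7, exact also for negative ints)
def groupSeptsB (group : List Int) : List Int :=
  let acc := accOfB group
  let count := group.length + (if group.length == 7 then 1 else 0)
  (List.range count).map (fun k => PySem.Int.mod (PySem.Int.floordiv acc (2 ^ (7 * k))) 128)

-- the 'while g < len(data)' loop of pass 1, recursion on len(data) - g
def septsFromB (data : List Int) (g : Nat) : List Int :=
  if g < data.length then
    groupSeptsB ((data.drop g).take 7) ++ septsFromB data (g + 7)
  else []
termination_by data.length - g

-- body of pass 2: one septet to at most one character, with the escape flag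
def emitB (st : List Char × Bool) (s : Int) : List Char × Bool :=
  if s == 27 then (st.1, true)
  else if st.2 then (st.1 ++ [PySem.List.pyGetD gsm7Ext s '`'], false)
  else (st.1 ++ [PySem.List.pyGetD gsm7Basic s '`'], false)

def decodeGsm7_alt (codedtext : String) : String :=
  let cs := codedtext.toList
  if cs = [] then ""   -- raise Exception("Empy data to decode"); excluded by Pre_
  else
    let data := (PySem.List.pyRange 0 cs.length 2).map
      (fun i => (pyIntHex2? (PySem.List.slice cs (some i) (some (i + 2)))).getD 0)
    let septets := septsFromB data 0
    let st := septets.foldl emitB (([] : List Char), false)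
    String.ofList st.1

-- ===== PRECONDITION & SPEC =====

-- a chunk int(·,16) accepts: a hex digit, optionally preceded by one sign or
-- one whitespace character or followed by one whitespace character, or two digits
def hexChunkOK (chunk : List Char) : Bool :=
  match chunk with
  | [c] => (hexVal? c).isSome
  | [c1, c2] =>
    ((hexVal? c1).isSome && ((hexVal? c2).isSome || isPySpace c2))
      || ((c1 = '+' || c1 = '-' || isPySpace c1) && (hexVal? c2).isSome)
  | _ => false

-- Pre_ excludes exactly the inputs where A raises: the empty string
-- (Exception) and inputs with a 2-character chunk int(·,16) rejects (ValueError).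
def Pre_decodeGsm7 (codedtext : String) : Prop :=
  codedtext.toList ≠ [] ∧ (chunksA codedtext.toList 2).all hexChunkOK = true

instance (codedtext : String) : Decidable (Pre_decodeGsm7 codedtext) := by
  unfold Pre_decodeGsm7; infer_instance

def pvWitness_decodeGsm7 : String := "c8329bfd06"

def Spec_decodeGsm7 (codedtext : String) (out : String) : Prop := out = decodeGsm7_alt codedtext
instance (codedtext : String) (out : String) : Decidable (Spec_decodeGsm7 codedtext out) := by unfold Spec_decodeGsm7; infer_instance

-- ===== CLAIM (what is proved, stated in full; the proofs are below) =====
def Claim_equal_decodeGsm7 : Prop := ∀ (codedtext : String), Dom_decodeGsm7 codedtext → Pre_decodeGsm7 codedtext → Spec_decodeGsm7 codedtext (decodeGsm7 codedtext)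

-- ===== LEMMAS AND PROOFS =====


-- byte-level loop body of A (stepA after the int(·,16) parse)
def stepA' (st : Int × Int × List Char × Bool) (byte : Int) : Int × Int × List Char × Bool :=
  let (number, bitcount, output, found) := st
  let number := number + byte * 2 ^ bitcount.toNat
  let bitcount := bitcount + 1
  let (output, found) :=
    if PySem.Int.mod number 128 == 27 then (output, true)
    else if found then (output ++ [PySem.List.pyGetD gsm7Ext (PySem.Int.mod number 128) '`'], false)
    else (output ++ [PySem.List.pyGetD gsm7Basic (PySem.Int.mod number 128) '`'], false)
  let number := PySem.Int.floordiv number 128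
  if bitcount == 7 then
    let (output, found) :=
      if PySem.Int.mod number 128 == 27 then (output, true)
      else if found then (output ++ [PySem.List.pyGetD gsm7Ext (PySem.Int.mod number 128) '`'], false)
      else (output ++ [PySem.List.pyGetD gsm7Basic (PySem.Int.mod number 128) '`'], false)
    (0, 0, output, found)
  else (number, bitcount, output, found)

theorem stepA_eq (st : Int × Int × List Char × Bool) (chunk : List Char) :
    stepA st chunk = stepA' st ((pyIntHex2? chunk).getD 0) := rfl

-- k-th septet of a packed group value
def septV (acc : Int) (k : Nat) : Int := acc / 2 ^ (7 * k) % 128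

theorem groupSeptsB_eq (p : List Int) :
    groupSeptsB p =
      (List.range (p.length + (if p.length == 7 then 1 else 0))).map (septV (accOfB p)) := by
  unfold groupSeptsB
  apply List.map_congr_left
  intro k _
  rw [PySem.Int.floordiv_eq_ediv_of_pos (by positivity),
    PySem.Int.mod_eq_emod_of_pos (by norm_num)]
  rfl

theorem enumerate_append_singleton {α : Type} (q : List α) (b : α) : ∀ (s : Int),
    PySem.List.enumerate (q ++ [b]) s = PySem.List.enumerate q s ++ [((s + q.length : Int), b)] := by
  induction q with
  | nil => intro s; simp [PySem.List.enumerate_nil, PySem.List.enumerate_cons]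
  | cons x xs ih =>
    intro s
    simp only [List.cons_append, PySem.List.enumerate_cons, ih (s + 1), List.length_cons]
    push_cast
    rw [show s + ((xs.length : Int) + 1) = s + 1 + (xs.length : Int) from by ring]

theorem accOfB_append (q : List Int) (b : Int) :
    accOfB (q ++ [b]) = accOfB q + b * 2 ^ (8 * q.length) := by
  simp [accOfB, enumerate_append_singleton, List.foldl_append]

-- septets below index m are unchanged by adding a byte at bit 8*m
theorem septV_stable (a b : Int) (k m : Nat) (h : k < m) :
    septV (a + b * 2 ^ (8 * m)) k = septV a k := by
  have h1 : (2:Int) ^ (8 * m) = 2 ^ (7 + (8 * m - 7 * k - 7)) * 2 ^ (7 * k) := by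
    rw [← pow_add]; congr 1; omega
  have h2 : (2:Int) ^ (7 + (8 * m - 7 * k - 7)) = (2:Int) ^ (8 * m - 7 * k - 7) * 128 := by
    rw [pow_add]; ring
  rw [septV, septV, h1, ← mul_assoc,
    Int.add_mul_ediv_right _ _ (by positivity : ((2:Int) ^ (7 * k)) ≠ 0), h2, ← mul_assoc,
    Int.add_mul_emod_self_right]

theorem ediv_pow_succ (a : Int) (m : Nat) : a / 2 ^ (7 * m) / 128 = a / 2 ^ (7 * (m + 1)) := by
  rw [Int.ediv_ediv_of_nonneg (by positivity : (0:Int) ≤ 2 ^ (7 * m))]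
  congr 1
  rw [show 7 * (m + 1) = 7 * m + 7 by ring, pow_add]
  norm_num

theorem fdiv_add_shift (a b : Int) (m : Nat) :
    a / 2 ^ (7 * m) + b * 2 ^ m = (a + b * 2 ^ (8 * m)) / 2 ^ (7 * m) := by
  have h1 : (2:Int) ^ (8 * m) = 2 ^ m * 2 ^ (7 * m) := by rw [← pow_add]; congr 1; omega
  rw [h1, ← mul_assoc, Int.add_mul_ediv_right _ _ (by positivity : ((2:Int) ^ (7 * m)) ≠ 0)]

theorem step_mid (q : List Int) (b : Int) (st : List Char × Bool) (h : q.length + 1 < 7) :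
    stepA' (accOfB q / 2 ^ (7 * q.length), (q.length : Int), st) b =
      (accOfB (q ++ [b]) / 2 ^ (7 * (q.length + 1)), ((q.length + 1 : Nat) : Int),
        emitB st (septV (accOfB (q ++ [b])) q.length)) := by
  obtain ⟨O, F⟩ := st
  have hb : ((q.length : Int)).toNat = q.length := Int.toNat_natCast _
  have hnum : accOfB q / 2 ^ (7 * q.length) + b * 2 ^ q.length =
      accOfB (q ++ [b]) / 2 ^ (7 * q.length) := by
    rw [fdiv_add_shift, accOfB_append]
  have hcond : (((q.length : Int) + 1) == 7) = false := by
    simp only [beq_eq_false_iff_ne, ne_eq]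
    omega
  simp only [stepA', hb, hnum, hcond, Bool.false_eq_true, if_false, emitB, septV,
    PySem.Int.floordiv_eq_ediv_of_pos (show (0:Int) < 128 by norm_num),
    PySem.Int.mod_eq_emod_of_pos (show (0:Int) < 128 by norm_num),
    ediv_pow_succ]
  push_cast
  rfl

theorem step_last (q : List Int) (b : Int) (st : List Char × Bool) (h : q.length = 6) :
    stepA' (accOfB q / 2 ^ (7 * q.length), (q.length : Int), st) b =
      (0, 0, emitB (emitB st (septV (accOfB (q ++ [b])) q.length))
        (septV (accOfB (q ++ [b])) (q.length + 1))) := by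
  obtain ⟨O, F⟩ := st
  have hb : ((q.length : Int)).toNat = q.length := Int.toNat_natCast _
  have hnum : accOfB q / 2 ^ (7 * q.length) + b * 2 ^ q.length =
      accOfB (q ++ [b]) / 2 ^ (7 * q.length) := by
    rw [fdiv_add_shift, accOfB_append]
  have hcond : (((q.length : Int) + 1) == 7) = true := by
    simp [h]
  simp only [stepA', hb, hnum, hcond, if_true, emitB, septV,
    PySem.Int.floordiv_eq_ediv_of_pos (show (0:Int) < 128 by norm_num),
    PySem.Int.mod_eq_emod_of_pos (show (0:Int) < 128 by norm_num),
    ediv_pow_succ]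

-- septets of a partial group agree with those of the group extended on the right
theorem map_septV_stable (q : List Int) (b : Int) :
    (List.range q.length).map (septV (accOfB (q ++ [b]))) =
      (List.range q.length).map (septV (accOfB q)) := by
  apply List.map_congr_left
  intro k hk
  rw [accOfB_append, septV_stable _ _ _ _ (List.mem_range.mp hk)]

-- invariant for a partial group (fewer than 7 bytes since the last reset)
theorem partial_run (p : List Int) (st : List Char × Bool) (h : p.length < 7) :
    List.foldl stepA' ((0 : Int), (0 : Int), st) p =
      (accOfB p / 2 ^ (7 * p.length), (p.length : Int),
        List.foldl emitB st (groupSeptsB p)) := by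
  induction p using List.reverseRecOn with
  | nil => simp [accOfB, PySem.List.enumerate_nil, groupSeptsB]
  | append_singleton q b ih =>
    have hq : q.length + 1 < 7 := by simpa using h
    have h7 : ((q.length + 1) == 7) = false := by
      simp only [beq_eq_false_iff_ne, ne_eq]; omega
    have h7q : (q.length == 7) = false := by
      simp only [beq_eq_false_iff_ne, ne_eq]; omega
    rw [List.foldl_append, List.foldl_cons, List.foldl_nil, ih (by omega), step_mid _ _ _ hq,
      groupSeptsB_eq, groupSeptsB_eq]
    simp only [List.length_append, List.length_singleton, h7, h7q, if_false,
      Bool.false_eq_true, Nat.add_zero, List.range_succ, List.map_append, List.foldl_append,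
      List.map_singleton, List.foldl_cons, List.foldl_nil, map_septV_stable]

theorem full_run (g : List Int) (st : List Char × Bool) (h : g.length = 7) :
    List.foldl stepA' ((0 : Int), (0 : Int), st) g =
      (0, 0, List.foldl emitB st (groupSeptsB g)) := by
  have hne : g ≠ [] := by intro hg; simp [hg] at h
  have hsplit : g = g.dropLast ++ [g.getLast hne] := (List.dropLast_append_getLast hne).symm
  have hlen : g.dropLast.length = 6 := by simp [List.length_dropLast, h]
  have hgq : groupSeptsB g.dropLast = (List.range 6).map (septV (accOfB g.dropLast)) := by
    rw [groupSeptsB_eq, hlen]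
    norm_num
  have h7 : (((g.dropLast ++ [g.getLast hne]).length) == 7) = true := by simp [hlen]
  have hms : (List.range 6).map (septV (accOfB (g.dropLast ++ [g.getLast hne]))) =
      (List.range 6).map (septV (accOfB g.dropLast)) := by
    rw [← hlen]
    exact map_septV_stable _ _
  conv_lhs => rw [hsplit]
  conv_rhs => rw [hsplit]
  rw [List.foldl_append, List.foldl_cons, List.foldl_nil, partial_run _ _ (by omega),
    step_last _ _ _ hlen, hgq, groupSeptsB_eq (g.dropLast ++ [g.getLast hne]), h7]
  simp only [List.length_append, List.length_singleton, hlen, if_true]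
  rw [show List.range (6 + 1 + 1) = List.range 6 ++ [6] ++ [7] from by decide]
  simp only [List.map_append, List.foldl_append, List.map_singleton, List.foldl_cons,
    List.foldl_nil, hms]

theorem septsFromB_shift (data : List Int) (g : Nat) :
    septsFromB data (g + 7) = septsFromB (data.drop 7) g := by
  have key : ∀ (n : Nat) (data : List Int) (g : Nat), data.length - g ≤ n →
      septsFromB data (g + 7) = septsFromB (data.drop 7) g := by
    intro n
    induction n with
    | zero =>
      intro data g hn
      conv_lhs => rw [septsFromB]
      conv_rhs => rw [septsFromB]
      rw [if_neg (by omega), if_neg (by rw [List.length_drop]; omega)]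
    | succ n ihn =>
      intro data g hn
      conv_lhs => rw [septsFromB]
      conv_rhs => rw [septsFromB]
      by_cases hlt : g + 7 < data.length
      · have hrec : data.length - (g + 7) ≤ n := by omega
        rw [if_pos hlt, if_pos (by rw [List.length_drop]; omega), List.drop_drop,
          ihn data (g + 7) hrec, Nat.add_comm 7 g]
      · rw [if_neg hlt, if_neg (by rw [List.length_drop]; omega)]
  exact key (data.length - g) data g le_rfl

theorem main_run (data : List Int) (st : List Char × Bool) :
    (List.foldl stepA' ((0 : Int), (0 : Int), st) data).2.2 =
      List.foldl emitB st (septsFromB data 0) := by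
  have key : ∀ (n : Nat) (data : List Int) (st : List Char × Bool), data.length ≤ n →
      (List.foldl stepA' ((0 : Int), (0 : Int), st) data).2.2 =
        List.foldl emitB st (septsFromB data 0) := by
    intro n
    induction n with
    | zero =>
      intro data st hn
      have hd : data = [] := List.eq_nil_of_length_eq_zero (by omega)
      subst hd
      conv_rhs => rw [septsFromB]
      rw [if_neg (by simp)]
      simp
    | succ n ihn =>
      intro data st hn
      rcases eq_or_ne data [] with hd | hd
      · subst hd
        conv_rhs => rw [septsFromB]
        rw [if_neg (by simp)]
        simp
      · have hpos : 0 < data.length := List.length_pos_of_ne_nil hd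
        conv_rhs => rw [septsFromB]
        rw [if_pos hpos, List.drop_zero, show (0:Nat) + 7 = 7 from rfl, septsFromB_shift,
          List.foldl_append]
        by_cases hlen : data.length < 7
        · rw [List.take_of_length_le (by omega), partial_run data st hlen]
          rw [show data.drop 7 = [] from List.drop_eq_nil_of_le (by omega)]
          conv_rhs => rw [septsFromB]
          rw [if_neg (by simp)]
          simp
        · conv_lhs => rw [← List.take_append_drop 7 data, List.foldl_append]
          rw [full_run (data.take 7) st (by rw [List.length_take]; omega)]
          exact ihn (data.drop 7) _ (by rw [List.length_drop]; omega)
  exact key data.length data st le_rfl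

theorem decodeGsm7_unconditional (codedtext : String) :
    decodeGsm7 codedtext = decodeGsm7_alt codedtext := by
  by_cases h : codedtext.toList = []
  · simp [decodeGsm7, decodeGsm7_alt, h]
  · simp only [decodeGsm7, decodeGsm7_alt, if_neg h]
    have hchunks : (chunksA codedtext.toList 2).map (fun ch => (pyIntHex2? ch).getD 0) =
        (PySem.List.pyRange 0 codedtext.toList.length 2).map
          (fun i => (pyIntHex2? (PySem.List.slice codedtext.toList (some i) (some (i + 2)))).getD 0) := by
      simp only [chunksA]
      norm_num
    have hfun : stepA = fun st ch => stepA' st ((pyIntHex2? ch).getD 0) :=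
      funext fun st => funext fun ch => stepA_eq st ch
    rw [hfun, ← List.foldl_map, hchunks]
    have hmain := main_run ((PySem.List.pyRange 0 codedtext.toList.length 2).map
      (fun i => (pyIntHex2? (PySem.List.slice codedtext.toList (some i) (some (i + 2)))).getD 0))
      (([] : List Char), false)
    rw [congrArg Prod.fst hmain]

-- ===== VERDICT (by name: the statement is the Claim_ definition above) =====
theorem decodeGsm7_spec : Claim_equal_decodeGsm7 := by
  intro codedtext _ _
  exact decodeGsm7_unconditional codedtext
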